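-- pv_equiv track=rewrite | github.com/AEM001/mm | 2/segmentation_optimization.py | valid_boundaries
-- ===== SOURCE A (Python) =====
-- def valid_boundaries(boundaries, n, K, N_min):
--     """检查边界合法性：严格递增、每段 >= N_min"""
--     if len(boundaries) != K - 1:
--         return False
--     if not all(boundaries[i] < boundaries[i+1] for i in range(len(boundaries) - 1)):
--         return False
--     # 段长度
--     idx_starts = [0] + [b + 1 for b in boundaries]
--     idx_ends = boundaries + [n - 1]
--     sizes = [e - s + 1 for s, e in zip(idx_starts, idx_ends)]
--     return all(sz >= N_min for sz in sizes)
-- ===== SOURCE B (Python) =====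
-- def valid_boundaries(boundaries, n, K, N_min):
--     """Single linear pass: check strict increase and segment size together."""
--     if len(boundaries) != K - 1:
--         return False
--     prev = None
--     for b in boundaries:
--         if prev is None:
--             size = b + 1
--         else:
--             if b <= prev:
--                 return False
--             size = b - prev
--         if size < N_min:
--             return False
--         prev = b
--     last = n if prev is None else n - (prev + 1)
--     return last >= N_min
-- ===== Notes on version B (the rewrite author's own statement) =====
-- stated objective: simpler
-- what changed: replaces A's three intermediate lists (idx_starts/idx_ends/sizes) and two separate all() passes with one early-exiting linear pass keeping only the previous boundary, checking monotonicity and segment size together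
import Mathlib
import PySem

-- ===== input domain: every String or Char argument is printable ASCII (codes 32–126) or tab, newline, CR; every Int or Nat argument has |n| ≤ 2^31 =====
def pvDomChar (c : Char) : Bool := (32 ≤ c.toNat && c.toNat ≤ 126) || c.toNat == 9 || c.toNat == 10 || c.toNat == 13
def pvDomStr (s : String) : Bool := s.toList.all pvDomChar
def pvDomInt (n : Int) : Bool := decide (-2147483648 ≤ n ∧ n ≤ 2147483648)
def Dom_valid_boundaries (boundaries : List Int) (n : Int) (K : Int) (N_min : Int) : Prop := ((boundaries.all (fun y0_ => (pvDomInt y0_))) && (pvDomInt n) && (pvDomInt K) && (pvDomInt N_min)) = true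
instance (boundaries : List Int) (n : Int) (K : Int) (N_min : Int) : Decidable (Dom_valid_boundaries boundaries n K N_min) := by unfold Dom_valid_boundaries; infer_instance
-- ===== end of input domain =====

-- B replaces A's three intermediate lists and two all() passes with one early-exiting
-- linear pass over the boundaries keeping only the previous boundary (objective: simpler).


-- ===== PORT A =====
-- all(boundaries[i] < boundaries[i+1] for i in range(len(boundaries)-1));
-- the indices i, i+1 are nonnegative and in range, so List.getElem? is exactly Python's indexing here
def vbChk (bs : List Int) : Bool :=
  (List.range (bs.length - 1)).all (fun i =>
    match bs[i]?, bs[i+1]? with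
    | some a, some b => decide (a < b)
    | _, _ => false)

def valid_boundaries (boundaries : List Int) (n : Int) (K : Int) (N_min : Int) : Bool :=
  if (boundaries.length : Int) ≠ K - 1 then false
  else if !(vbChk boundaries) then false
  else
    let idx_starts := 0 :: boundaries.map (· + 1)
    let idx_ends := boundaries ++ [n - 1]
    let sizes := (idx_starts.zip idx_ends).map (fun se => se.2 - se.1 + 1)
    sizes.all (fun sz => decide (sz ≥ N_min))

-- ===== PORT B =====
-- the loop of Source B: `prev : Option Int` is the running previous boundary
def vbGo (prev : Option Int) (bs : List Int) (n : Int) (N_min : Int) : Bool :=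
  match bs with
  | [] => decide ((match prev with | none => n | some p => n - (p + 1)) ≥ N_min)
  | b :: rest =>
    match prev with
    | none => if b + 1 < N_min then false else vbGo (some b) rest n N_min
    | some p =>
      if b ≤ p then false
      else if b - p < N_min then false
      else vbGo (some b) rest n N_min

def valid_boundaries_alt (boundaries : List Int) (n : Int) (K : Int) (N_min : Int) : Bool :=
  if (boundaries.length : Int) ≠ K - 1 then false
  else vbGo none boundaries n N_min

-- ===== PRECONDITION & SPEC =====
def Spec_valid_boundaries (boundaries : List Int) (n : Int) (K : Int) (N_min : Int) (out : Bool) : Prop := out = valid_boundaries_alt boundaries n K N_min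
instance (boundaries : List Int) (n : Int) (K : Int) (N_min : Int) (out : Bool) : Decidable (Spec_valid_boundaries boundaries n K N_min out) := by unfold Spec_valid_boundaries; infer_instance

-- ===== CLAIM (what is proved, stated in full; the proofs are below) =====
def Claim_equal_valid_boundaries : Prop := ∀ (boundaries : List Int) (n : Int) (K : Int) (N_min : Int), Dom_valid_boundaries boundaries n K N_min → Spec_valid_boundaries boundaries n K N_min (valid_boundaries boundaries n K N_min)

-- ===== LEMMAS AND PROOFS =====

-- chain p bs : the boundaries p :: bs are strictly increasing
def vbChain (p : Int) : List Int → Bool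
  | [] => true
  | b :: t => decide (p < b) && vbChain b t

-- tsz p bs : every segment size after boundary p (including the final one up to n-1) is ≥ N_min
def vbTsz (n N_min p : Int) : List Int → Bool
  | [] => decide (N_min ≤ n - (p + 1))
  | b :: t => decide (N_min ≤ b - p) && vbTsz n N_min b t

theorem vbChk_cons (a : Int) (t : List Int) : vbChk (a :: t) = vbChain a t := by
  induction t generalizing a with
  | nil => rfl
  | cons b rest ih =>
    rw [show vbChain a (b :: rest) = (decide (a < b) && vbChain b rest) from rfl, ← ih b]
    simp only [vbChk, List.length_cons, Nat.add_sub_cancel, List.range_succ_eq_map,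
      List.all_cons, List.all_map]
    congr 1

theorem vbSizes_tail (n N_min : Int) (t : List Int) (p : Int) :
    ((((p + 1) :: t.map (· + 1)).zip (t ++ [n - 1])).map (fun se => se.2 - se.1 + 1)).all
      (fun sz => decide (sz ≥ N_min)) = vbTsz n N_min p t := by
  induction t generalizing p with
  | nil =>
    simp only [List.map_nil, List.nil_append, List.zip_cons_cons, List.zip_nil_right,
      List.map_cons, List.map_nil, List.all_cons, List.all_nil, Bool.and_true, vbTsz]
    exact decide_eq_decide.mpr (by omega)
  | cons b rest ih =>
    simp only [List.map_cons, List.cons_append, List.zip_cons_cons, List.map_cons,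
      List.all_cons, vbTsz, ih b]
    congr 1
    exact decide_eq_decide.mpr (by omega)

theorem vbGo_some (n N_min : Int) (bs : List Int) (p : Int) :
    vbGo (some p) bs n N_min = (vbChain p bs && vbTsz n N_min p bs) := by
  induction bs generalizing p with
  | nil => simp [vbGo, vbChain, vbTsz]
  | cons b rest ih =>
    simp only [vbGo, vbChain, vbTsz, ih b]
    by_cases h1 : b ≤ p
    · simp [h1, show ¬ p < b by omega]
    · by_cases h2 : b - p < N_min
      · simp [h1, h2, show ¬ N_min ≤ b - p by omega]
      · simp [h1, h2, show p < b by omega, show N_min ≤ b - p by omega]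

-- ===== VERDICT (by name: the statement is the Claim_ definition above) =====
theorem valid_boundaries_spec : Claim_equal_valid_boundaries := by
  intro bs n K N_min _
  show valid_boundaries bs n K N_min = valid_boundaries_alt bs n K N_min
  unfold valid_boundaries valid_boundaries_alt
  by_cases hk : (bs.length : Int) ≠ K - 1
  · simp [hk]
  · simp only [hk, if_false]
    cases bs with
    | nil =>
      simp only [vbGo, vbChk]
      simp only [List.length_nil, Nat.zero_sub, List.range_zero, List.all_nil,
        Bool.not_true, if_false, List.map_nil, List.nil_append, List.zip_cons_cons,
        List.zip_nil_right, List.map_cons, List.map_nil, List.all_cons, List.all_nil,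
        Bool.and_true, Bool.false_eq_true]
      exact decide_eq_decide.mpr (by omega)
    | cons a t =>
      rw [vbChk_cons]
      simp only [List.map_cons, List.cons_append, List.zip_cons_cons,
        List.map_cons, List.all_cons]
      rw [vbSizes_tail n N_min t a]
      have hs : decide (a - 0 + 1 ≥ N_min) = !decide (a + 1 < N_min) := by
        by_cases h : a + 1 < N_min
        · simp [h, show ¬ N_min ≤ a + 1 by omega]
        · simp [h, show N_min ≤ a + 1 by omega]
      rw [hs]
      simp only [vbGo, vbGo_some]
      by_cases hc : vbChain a t <;> by_cases h1 : a + 1 < N_min <;>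
        simp [hc, h1]
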